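-- pv_equiv track=rewrite | github.com/vineetajaiswal/smart-rule-based-chatbot | app.py | chatbot_response
-- ===== SOURCE A (Python) =====
-- def chatbot_response(user_input):
--     user_input = user_input.lower().strip()
--
--     # Greetings
--     if any(word in user_input for word in ["hi", "hello", "hey", "hii", "hy"]):
--         return "Hello! 👋 How can I help you today?"
--
--     # Identity
--     elif "your name" in user_input or "who are you" in user_input:
--         return "I am a Smart Rule-Based AI Chatbot 🤖"
--
--     elif "who made you" in user_input or "who created you" in user_input:
--         return "I was created using Python and Streamlit as part of an AI internship project."
--
--     # Help
--     elif "help" in user_input or "what can you do" in user_input: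
--         return """I can answer questions about:
-- - Python
-- - AI
-- - Machine Learning
-- - Data Science
-- - Streamlit
-- - GitHub
-- - Internships
--
-- Try asking:
-- - What is Python?
-- - What is AI?
-- - What is Machine Learning?
-- - What is Streamlit?
-- """
--
--     # Tech / AI topics
--     elif "what is python" in user_input:
--         return "Python is a high-level programming language known for its simplicity and wide use in web development, automation, data science, and AI."
--
--     elif "what is ai" in user_input or "what is artificial intelligence" in user_input:
--         return "Artificial Intelligence (AI) is the simulation of human intelligence in machines so they can learn, reason, and make decisions."
--
--     elif "what is machine learning" in user_input:
--         return "Machine Learning is a branch of AI where systems learn patterns from data and make predictions without being explicitly programmed for every task."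
--
--     elif "what is data science" in user_input:
--         return "Data Science is the field of extracting useful insights from data using statistics, programming, and machine learning."
--
--     elif "what is streamlit" in user_input:
--         return "Streamlit is a Python framework used to build interactive web apps for data science, machine learning, and AI projects quickly."
--
--     elif "what is github" in user_input:
--         return "GitHub is a cloud-based platform used to store, manage, and share code using Git version control."
--
--     elif "what is internship" in user_input:
--         return "An internship is a short-term practical work experience program where students or beginners learn industry skills by working on real tasks or projects."
--
--     # Fun / polite
--     elif "how are you" in user_input:
--         return "I'm doing great 😄 Thanks for asking!"
--
--     elif "joke" in user_input:
--         return "Why do programmers prefer dark mode? 😄 Because light attracts bugs!"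
--
--     elif "thank you" in user_input or "thanks" in user_input:
--         return "You're welcome 😊"
--
--     elif "bye" in user_input or "goodbye" in user_input:
--         return "Goodbye! 👋 Have a great day."
--
--     # Default fallback
--     else:
--         return """Sorry, I don't have an answer for that yet. 😅
--
-- Try asking things like:
-- - What is Python?
-- - What is AI?
-- - What is Machine Learning?
-- - What is Streamlit?
-- - What is GitHub?
-- """
-- ===== SOURCE B (Python) =====
-- # B: instead of an ordered first-match rule chain, index every trigger keyword with the
-- # priority of its response in a flat table, compute the MINIMUM priority among all
-- # triggers that occur in the text (substring search done by an explicit position scan),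
-- # and index into the response table; the last slot is the fallback.
--
-- RESPONSES = [
--     "Hello! \U0001F44B How can I help you today?",
--     "I am a Smart Rule-Based AI Chatbot \U0001F916",
--     "I was created using Python and Streamlit as part of an AI internship project.",
--     """I can answer questions about:
-- - Python
-- - AI
-- - Machine Learning
-- - Data Science
-- - Streamlit
-- - GitHub
-- - Internships
--
-- Try asking:
-- - What is Python?
-- - What is AI?
-- - What is Machine Learning?
-- - What is Streamlit?
-- """,
--     "Python is a high-level programming language known for its simplicity and wide use in web development, automation, data science, and AI.",
--     "Artificial Intelligence (AI) is the simulation of human intelligence in machines so they can learn, reason, and make decisions.",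
--     "Machine Learning is a branch of AI where systems learn patterns from data and make predictions without being explicitly programmed for every task.",
--     "Data Science is the field of extracting useful insights from data using statistics, programming, and machine learning.",
--     "Streamlit is a Python framework used to build interactive web apps for data science, machine learning, and AI projects quickly.",
--     "GitHub is a cloud-based platform used to store, manage, and share code using Git version control.",
--     "An internship is a short-term practical work experience program where students or beginners learn industry skills by working on real tasks or projects.",
--     "I'm doing great \U0001F604 Thanks for asking!",
--     "Why do programmers prefer dark mode? \U0001F604 Because light attracts bugs!",
--     "You're welcome \U0001F60A",
--     "Goodbye! \U0001F44B Have a great day.",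
--     """Sorry, I don't have an answer for that yet. \U0001F605
--
-- Try asking things like:
-- - What is Python?
-- - What is AI?
-- - What is Machine Learning?
-- - What is Streamlit?
-- - What is GitHub?
-- """,
-- ]
--
-- TRIGGERS = [
--     ("hi", 0), ("hello", 0), ("hey", 0), ("hii", 0), ("hy", 0),
--     ("your name", 1), ("who are you", 1),
--     ("who made you", 2), ("who created you", 2),
--     ("help", 3), ("what can you do", 3),
--     ("what is python", 4),
--     ("what is ai", 5), ("what is artificial intelligence", 5),
--     ("what is machine learning", 6),
--     ("what is data science", 7),
--     ("what is streamlit", 8),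
--     ("what is github", 9),
--     ("what is internship", 10),
--     ("how are you", 11),
--     ("joke", 12),
--     ("thank you", 13), ("thanks", 13),
--     ("bye", 14), ("goodbye", 14),
-- ]
--
--
-- def _occurs(trigger, text):
--     # explicit position-by-position substring scan
--     for i in range(len(text) + 1):
--         if text.startswith(trigger, i):
--             return True
--     return False
--
--
-- def chatbot_response(user_input):
--     text = user_input.lower().strip()
--     best = len(RESPONSES) - 1  # fallback priority
--     for trigger, priority in TRIGGERS:
--         if priority < best and _occurs(trigger, text):
--             best = priority
--     return RESPONSES[best]
-- ===== Notes on version B (the rewrite author's own statement) =====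
-- stated objective: alternative
-- what changed: Replaced the ordered first-match elif chain with a flat keyword index mapping each trigger to a response priority: B computes the minimum priority among all triggers occurring in the text (substring occurrence found by an explicit position scan rather than the 'in' operator) and indexes the response table, with the last slot as fallback.
import Mathlib
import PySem

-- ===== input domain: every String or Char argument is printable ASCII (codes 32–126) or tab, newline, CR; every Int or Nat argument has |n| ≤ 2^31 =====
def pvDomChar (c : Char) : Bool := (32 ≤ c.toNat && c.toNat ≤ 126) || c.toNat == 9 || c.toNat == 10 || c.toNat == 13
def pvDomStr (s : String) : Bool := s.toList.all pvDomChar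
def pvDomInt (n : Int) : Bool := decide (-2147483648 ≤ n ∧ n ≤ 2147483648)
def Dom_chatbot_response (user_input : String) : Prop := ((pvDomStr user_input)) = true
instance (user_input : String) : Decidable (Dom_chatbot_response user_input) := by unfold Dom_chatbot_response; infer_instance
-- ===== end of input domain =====

-- B replaces A's ordered elif chain by a flat keyword→priority index: it computes the
-- minimum response priority among all occurring triggers (substring search by an explicit
-- position scan) and indexes a response table (objective: alternative); return values identical.

-- ===== PORT A =====
-- literal transliteration of A's if/elif chain
def chatbot_response (user_input : String) : String :=
  let u := PySem.Str.strip (PySem.Str.lower user_input)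
  if (["hi", "hello", "hey", "hii", "hy"] : List String).any (fun w => PySem.Str.isIn w u) then "Hello! 👋 How can I help you today?"
  else   if PySem.Str.isIn "your name" u || PySem.Str.isIn "who are you" u then "I am a Smart Rule-Based AI Chatbot 🤖"
  else   if PySem.Str.isIn "who made you" u || PySem.Str.isIn "who created you" u then "I was created using Python and Streamlit as part of an AI internship project."
  else   if PySem.Str.isIn "help" u || PySem.Str.isIn "what can you do" u then "I can answer questions about:\n- Python\n- AI\n- Machine Learning\n- Data Science\n- Streamlit\n- GitHub\n- Internships\n\nTry asking:\n- What is Python?\n- What is AI?\n- What is Machine Learning?\n- What is Streamlit?\n"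
  else   if PySem.Str.isIn "what is python" u then "Python is a high-level programming language known for its simplicity and wide use in web development, automation, data science, and AI."
  else   if PySem.Str.isIn "what is ai" u || PySem.Str.isIn "what is artificial intelligence" u then "Artificial Intelligence (AI) is the simulation of human intelligence in machines so they can learn, reason, and make decisions."
  else   if PySem.Str.isIn "what is machine learning" u then "Machine Learning is a branch of AI where systems learn patterns from data and make predictions without being explicitly programmed for every task."
  else   if PySem.Str.isIn "what is data science" u then "Data Science is the field of extracting useful insights from data using statistics, programming, and machine learning."
  else   if PySem.Str.isIn "what is streamlit" u then "Streamlit is a Python framework used to build interactive web apps for data science, machine learning, and AI projects quickly."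
  else   if PySem.Str.isIn "what is github" u then "GitHub is a cloud-based platform used to store, manage, and share code using Git version control."
  else   if PySem.Str.isIn "what is internship" u then "An internship is a short-term practical work experience program where students or beginners learn industry skills by working on real tasks or projects."
  else   if PySem.Str.isIn "how are you" u then "I'm doing great 😄 Thanks for asking!"
  else   if PySem.Str.isIn "joke" u then "Why do programmers prefer dark mode? 😄 Because light attracts bugs!"
  else   if PySem.Str.isIn "thank you" u || PySem.Str.isIn "thanks" u then "You're welcome 😊"
  else   if PySem.Str.isIn "bye" u || PySem.Str.isIn "goodbye" u then "Goodbye! 👋 Have a great day."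
  else "Sorry, I don't have an answer for that yet. 😅\n\nTry asking things like:\n- What is Python?\n- What is AI?\n- What is Machine Learning?\n- What is Streamlit?\n- What is GitHub?\n"

-- ===== PORT B =====
-- B's response table; the last slot is the fallback
def pvResponses : List String :=
  ["Hello! 👋 How can I help you today?",
   "I am a Smart Rule-Based AI Chatbot 🤖",
   "I was created using Python and Streamlit as part of an AI internship project.",
   "I can answer questions about:\n- Python\n- AI\n- Machine Learning\n- Data Science\n- Streamlit\n- GitHub\n- Internships\n\nTry asking:\n- What is Python?\n- What is AI?\n- What is Machine Learning?\n- What is Streamlit?\n",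
   "Python is a high-level programming language known for its simplicity and wide use in web development, automation, data science, and AI.",
   "Artificial Intelligence (AI) is the simulation of human intelligence in machines so they can learn, reason, and make decisions.",
   "Machine Learning is a branch of AI where systems learn patterns from data and make predictions without being explicitly programmed for every task.",
   "Data Science is the field of extracting useful insights from data using statistics, programming, and machine learning.",
   "Streamlit is a Python framework used to build interactive web apps for data science, machine learning, and AI projects quickly.",
   "GitHub is a cloud-based platform used to store, manage, and share code using Git version control.",
   "An internship is a short-term practical work experience program where students or beginners learn industry skills by working on real tasks or projects.",
   "I'm doing great 😄 Thanks for asking!",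
   "Why do programmers prefer dark mode? 😄 Because light attracts bugs!",
   "You're welcome 😊",
   "Goodbye! 👋 Have a great day.",
   "Sorry, I don't have an answer for that yet. 😅\n\nTry asking things like:\n- What is Python?\n- What is AI?\n- What is Machine Learning?\n- What is Streamlit?\n- What is GitHub?\n"]

-- B's flat keyword index: (trigger, priority of its response)
def pvTriggers : List (String × Nat) :=
  [("hi", 0), ("hello", 0), ("hey", 0), ("hii", 0), ("hy", 0),
   ("your name", 1), ("who are you", 1),
   ("who made you", 2), ("who created you", 2),
   ("help", 3), ("what can you do", 3),
   ("what is python", 4),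
   ("what is ai", 5), ("what is artificial intelligence", 5),
   ("what is machine learning", 6),
   ("what is data science", 7),
   ("what is streamlit", 8),
   ("what is github", 9),
   ("what is internship", 10),
   ("how are you", 11),
   ("joke", 12),
   ("thank you", 13), ("thanks", 13),
   ("bye", 14), ("goodbye", 14)]

-- _occurs: explicit position-by-position substring scan (text.startswith(trigger, i) at
-- a nonnegative in-range offset is exactly isPrefixOf on the dropped char list)
def pvOccurs (t : List Char) (cs : List Char) : Bool :=
  (List.range (cs.length + 1)).any (fun i => t.isPrefixOf (cs.drop i))

-- best = min priority among occurring triggers (the accumulator loop of B's chatbot_response)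
def pvBest (cs : List Char) : Nat :=
  pvTriggers.foldl
    (fun best tp => if tp.2 < best ∧ pvOccurs tp.1.toList cs then tp.2 else best)
    (pvResponses.length - 1)

def chatbot_response_alt (user_input : String) : String :=
  pvResponses.getD (pvBest (PySem.Str.strip (PySem.Str.lower user_input)).toList) ""

-- ===== PRECONDITION & SPEC =====
def Spec_chatbot_response (user_input : String) (out : String) : Prop := out = chatbot_response_alt user_input
instance (user_input : String) (out : String) : Decidable (Spec_chatbot_response user_input out) := by unfold Spec_chatbot_response; infer_instance

-- ===== CLAIM (what is proved, stated in full; the proofs are below) =====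
def Claim_equal_chatbot_response : Prop := ∀ (user_input : String), Dom_chatbot_response user_input → Spec_chatbot_response user_input (chatbot_response user_input)

-- ===== LEMMAS AND PROOFS =====

-- pvOccurs agrees with Python's substring test
theorem pvOccurs_eq (t s : String) : pvOccurs t.toList s.toList = PySem.Str.isIn t s := by
  have h1 : pvOccurs t.toList s.toList = true ↔ PySem.Str.isIn t s = true := by
    rw [PySem.Str.isIn, ← PySem.Chars.exists_prefix_drop_iff_isIn t.toList s.toList]
    constructor
    · intro hp
      rw [pvOccurs, List.any_eq_true] at hp
      obtain ⟨i, _, hpre⟩ := hp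
      exact ⟨i, List.isPrefixOf_iff_prefix.mp hpre⟩
    · rintro ⟨j, hj⟩
      rw [pvOccurs, List.any_eq_true]
      have hpre : t.toList <+: s.toList.drop (min j s.toList.length) := by
        rcases le_or_gt j s.toList.length with hle | hgt
        · rw [min_eq_left hle]; exact hj
        · have h1 : s.toList.drop j = [] := List.drop_eq_nil_of_le (le_of_lt hgt)
          rw [min_eq_right (le_of_lt hgt), List.drop_length]
          rw [h1] at hj; exact hj
      exact ⟨min j s.toList.length, List.mem_range.mpr (by omega),
        List.isPrefixOf_iff_prefix.mpr hpre⟩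
  cases hA : pvOccurs t.toList s.toList <;> cases hB : PySem.Str.isIn t s <;> simp_all

-- the fold step used by B, abstracted over the occurrence predicate
def pvStep (P : String → Bool) (best : Nat) (tp : String × Nat) : Nat :=
  if tp.2 < best ∧ P tp.1 then tp.2 else best

-- a group of triggers sharing one priority
theorem fold_group (P : String → Bool) (g : List String) (j b : Nat) :
    (g.map (fun t => (t, j))).foldl (pvStep P) b = if j < b ∧ g.any P then j else b := by
  induction g generalizing b with
  | nil => simp
  | cons t g ih =>
    simp only [List.map_cons, List.foldl_cons, List.any_cons]
    rw [ih]
    by_cases hp : P t = true <;> by_cases hj : j < b <;>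
      simp [pvStep, hp, hj]

-- flatten groups with increasing priorities starting at j
def pvEncode : List (List String) → Nat → List (String × Nat)
  | [], _ => []
  | g :: gs, j => g.map (fun t => (t, j)) ++ pvEncode gs (j + 1)

-- once best ≤ every remaining priority the fold is a no-op
theorem fold_noop (P : String → Bool) : ∀ (gs : List (List String)) (j b : Nat), b ≤ j →
    (pvEncode gs j).foldl (pvStep P) b = b := by
  intro gs
  induction gs with
  | nil => intro j b _; rfl
  | cons g gs ih =>
    intro j b hb
    simp only [pvEncode, List.foldl_append, fold_group]
    rw [if_neg (by rintro ⟨h1, _⟩; omega)]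
    exact ih (j + 1) b (by omega)

-- first-match characterisation of the min-priority fold
def pvChain (P : String → Bool) : List (List String) → Nat → Nat → Nat
  | [], _, b => b
  | g :: gs, j, b => if g.any P then j else pvChain P gs (j + 1) b

theorem fold_encode (P : String → Bool) : ∀ (gs : List (List String)) (j b : Nat),
    j + gs.length ≤ b →
    (pvEncode gs j).foldl (pvStep P) b = pvChain P gs j b := by
  intro gs
  induction gs with
  | nil => intro j b _; rfl
  | cons g gs ih =>
    intro j b hb
    simp only [pvEncode, pvChain, List.foldl_append, fold_group, List.length_cons] at *
    by_cases hg : g.any P = true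
    · rw [if_pos ⟨by omega, hg⟩, if_pos hg]
      exact fold_noop P gs (j + 1) j (by omega)
    · rw [if_neg (by rintro ⟨_, h⟩; exact hg h), if_neg hg]
      exact ih (j + 1) b (by omega)

-- pvTriggers is the flattening of A's fifteen trigger groups
def pvGroups : List (List String) :=
  [["hi", "hello", "hey", "hii", "hy"],
   ["your name", "who are you"],
   ["who made you", "who created you"],
   ["help", "what can you do"],
   ["what is python"],
   ["what is ai", "what is artificial intelligence"],
   ["what is machine learning"],
   ["what is data science"],
   ["what is streamlit"],
   ["what is github"],
   ["what is internship"],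
   ["how are you"],
   ["joke"],
   ["thank you", "thanks"],
   ["bye", "goodbye"]]

theorem triggers_encode : pvTriggers = pvEncode pvGroups 0 := by
  simp [pvTriggers, pvGroups, pvEncode]

-- ===== VERDICT (by name: the statement is the Claim_ definition above) =====
theorem pvBest_eq (cs : List Char) :
    pvBest cs = pvChain (fun t => pvOccurs t.toList cs) pvGroups 0 15 := by
  unfold pvBest
  rw [show (fun best (tp : String × Nat) =>
      if tp.2 < best ∧ pvOccurs tp.1.toList cs then tp.2 else best)
    = pvStep (fun t => pvOccurs t.toList cs) from rfl]
  rw [triggers_encode, show pvResponses.length - 1 = 15 from rfl]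
  exact fold_encode _ pvGroups 0 15 (by simp [pvGroups])

-- ===== VERDICT (by name: the statement is the Claim_ definition above) =====
theorem chatbot_response_spec : Claim_equal_chatbot_response := by
  intro user_input _
  unfold Spec_chatbot_response chatbot_response chatbot_response_alt
  rw [pvBest_eq]
  simp only [pvGroups, pvChain]
  simp only [pvOccurs_eq]
  simp only [List.any_cons, List.any_nil, Bool.or_false]
  simp only [apply_ite (fun n => pvResponses.getD n "")]
  rfl
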